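-- pv_equiv track=rewrite | github.com/fcereda/atlas | scripts/candidatos/candidatos.py | groupByUf
-- ===== SOURCE A (Python) =====
-- def groupByUf (candidatos):
--     ufs = {}
--     for candidato in candidatos:
--         uf = candidato['UF'] + candidato['NUM_TURNO']
--         if (not uf in ufs):
--             ufs[uf] = []
--         ufs[uf].append(candidato)
--
--     return ufs
-- ===== SOURCE B (Python) =====
-- def groupByUf(candidatos):
--     # Two-pass re-implementation: first collect the distinct keys in first-occurrence
--     # order, then build each group by filtering the whole list for its key.
--     keys = list(dict.fromkeys(c['UF'] + c['NUM_TURNO'] for c in candidatos))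
--     return {k: [c for c in candidatos if c['UF'] + c['NUM_TURNO'] == k] for k in keys}
-- ===== Notes on version B (the rewrite author's own statement) =====
-- stated objective: alternative
-- what changed: Replaces A's single hash-accumulation pass (create-then-append into a dict) by a key-deduplication pass followed by one filtering scan per distinct key, building each group at once.
import Mathlib
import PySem

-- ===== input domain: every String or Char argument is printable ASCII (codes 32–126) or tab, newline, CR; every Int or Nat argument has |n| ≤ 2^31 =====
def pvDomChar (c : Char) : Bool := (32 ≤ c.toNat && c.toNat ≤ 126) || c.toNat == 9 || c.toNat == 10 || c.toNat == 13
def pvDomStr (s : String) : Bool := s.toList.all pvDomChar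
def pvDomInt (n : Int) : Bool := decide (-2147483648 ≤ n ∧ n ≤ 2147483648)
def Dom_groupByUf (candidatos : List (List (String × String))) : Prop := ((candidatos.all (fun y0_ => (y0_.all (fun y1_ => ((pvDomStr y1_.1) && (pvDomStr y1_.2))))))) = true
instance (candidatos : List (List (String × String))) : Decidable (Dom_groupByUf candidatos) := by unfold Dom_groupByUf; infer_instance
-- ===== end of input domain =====

-- B groups by a dedup-keys pass plus one filtering scan per distinct key instead of A's hash-accumulation pass; same result, not faster.

-- shared key helper: candidato['UF'] + candidato['NUM_TURNO'] (first-match lookup; Pre_ guarantees both keys exist, so the "" default is never used)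
def pvKey (c : List (String × String)) : String :=
  ((PySem.Dict.mk c).get? "UF").getD "" ++ ((PySem.Dict.mk c).get? "NUM_TURNO").getD ""

-- ===== PORT A =====
def groupByUf (candidatos : List (List (String × String))) : List (String × List (List (String × String))) :=
  (candidatos.foldl (fun ufs c =>
      let uf := pvKey c
      let ufs := if ufs.contains uf then ufs else ufs.insert uf ([] : List (List (String × String)))
      ufs.modify uf [] (fun l => l ++ [c]))   -- ufs[uf].append(candidato); the key is present here, so the dflt [] is unused
    PySem.Dict.empty).items

-- ===== PORT B =====
def groupByUf_alt (candidatos : List (List (String × String))) : List (String × List (List (String × String))) :=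
  let keys := PySem.List.dedup (candidatos.map pvKey)   -- list(dict.fromkeys(...))
  keys.map (fun k => (k, candidatos.filter (fun c => pvKey c == k)))

-- ===== PRECONDITION & SPEC =====
-- Pre_ excludes exactly the inputs on which A raises KeyError: some candidato lacks 'UF' or 'NUM_TURNO'.
def Pre_groupByUf (candidatos : List (List (String × String))) : Prop :=
  ∀ c ∈ candidatos, (PySem.Dict.mk c).contains "UF" = true ∧ (PySem.Dict.mk c).contains "NUM_TURNO" = true
instance (candidatos : List (List (String × String))) : Decidable (Pre_groupByUf candidatos) := by unfold Pre_groupByUf; infer_instance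
def pvWitness_groupByUf : (List (List (String × String))) :=
  [[("UF", "SP"), ("NUM_TURNO", "1")], [("UF", "RJ"), ("NUM_TURNO", "1")], [("UF", "SP"), ("NUM_TURNO", "2")]]
def Spec_groupByUf (candidatos : List (List (String × String))) (out : List (String × List (List (String × String)))) : Prop := out = groupByUf_alt candidatos
instance (candidatos : List (List (String × String))) (out : List (String × List (List (String × String)))) : Decidable (Spec_groupByUf candidatos out) := by unfold Spec_groupByUf; infer_instance

-- ===== CLAIM (what is proved, stated in full; the proofs are below) =====
def Claim_equal_groupByUf : Prop := ∀ (candidatos : List (List (String × String))), Dom_groupByUf candidatos → Pre_groupByUf candidatos → Spec_groupByUf candidatos (groupByUf candidatos)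

-- ===== LEMMAS AND PROOFS =====

-- A's step (ensure the key exists, then append) is one Dict.modify
lemma stepA_eq_modify (d : PySem.Dict String (List (List (String × String)))) (c : List (String × String)) :
    (if d.contains (pvKey c) then d else d.insert (pvKey c) ([] : List (List (String × String)))).modify (pvKey c) [] (fun l => l ++ [c])
    = d.modify (pvKey c) [] (fun l => l ++ [c]) := by
  split_ifs with h
  · rfl
  · rw [Bool.not_eq_true] at h
    simp [PySem.Dict.modify, PySem.Dict.getD_insert_self, PySem.Dict.insert_insert_self,
      PySem.Dict.getD_of_not_contains _ _ h]

lemma groupByUf_eq_alt (cs : List (List (String × String))) : groupByUf cs = groupByUf_alt cs := by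
  simp only [groupByUf, groupByUf_alt, stepA_eq_modify]
  have hfold : (cs.map (fun c => (pvKey c, c))).foldl
      (fun d (p : String × List (String × String)) => d.modify p.1 [] (fun l => l ++ [p.2])) PySem.Dict.empty
      = cs.foldl (fun d c => d.modify (pvKey c) [] (fun l => l ++ [c])) PySem.Dict.empty := by
    rw [List.foldl_map]
  rw [← hfold]
  rw [PySem.Dict.items_eq_map_keys _
    (PySem.Dict.nodup_keys_foldl_modify_key _ Prod.fst _ (fun d p => (fun l => l ++ [p.2])) _ (by simp)) []]
  have hk := PySem.Dict.keys_foldl_modify_key (cs.map (fun c => (pvKey c, c))) Prod.fst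
      ([] : List (List (String × String))) (fun d p => (fun l => l ++ [p.2])) PySem.Dict.empty
  simp only [PySem.Dict.keys_empty] at hk
  rw [hk, PySem.Set.update_nil_left, PySem.List.dedup_eq_ofList, List.map_map]
  apply List.map_congr_left
  intro k _
  simp [PySem.Dict.getD_foldl_modify_append, PySem.Dict.getD_empty, List.filter_map,
    List.map_map, Function.comp_def]

-- ===== VERDICT (by name: the statement is the Claim_ definition above) =====
theorem groupByUf_spec : Claim_equal_groupByUf := by
  intro cs _ _
  exact groupByUf_eq_alt cs
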